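-- pv_equiv track=rewrite | github.com/KoibuchiLab/topology-generator | algorithm.py | get_node_switch
-- ===== SOURCE A (Python) =====
-- def get_node_switch(routes, congestion):
--     node_switch = []    # (node pair)
--     dataflow = []       # num
--     for route in routes.items():
--         links = []
--         contain = True
--         for i in range(len(route[1])-1):
--             links.append((route[1][i], route[1][i+1]))
--         for link in congestion:
--             if link not in links:
--                 contain = False
--                 break
--         if contain == True:
--             node_switch.append((route[1][0]-10000, route[1][-1]-10000))
--             dataflow.append(route[0])
--     return node_switch, dataflow
-- ===== SOURCE B (Python) =====
-- def get_node_switch(routes, congestion):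
--     wanted = set(congestion)
--     node_switch = []
--     dataflow = []
--     for num, path in routes.items():
--         found = set()
--         for edge in zip(path, path[1:]):
--             if edge in wanted:
--                 found.add(edge)
--         if len(found) == len(wanted):
--             node_switch.append((path[0] - 10000, path[-1] - 10000))
--             dataflow.append(num)
--     return node_switch, dataflow
-- ===== Notes on version B (the rewrite author's own statement) =====
-- stated objective: alternative
-- what changed: Instead of materializing the full edge list of each route and scanning it once per congestion link (nested scans), B builds the set of congestion links once and makes a single pass over each route's consecutive edges, collecting the congestion links it meets; the route is kept iff the collected set has the same size as the congestion set.
import Mathlib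
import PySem

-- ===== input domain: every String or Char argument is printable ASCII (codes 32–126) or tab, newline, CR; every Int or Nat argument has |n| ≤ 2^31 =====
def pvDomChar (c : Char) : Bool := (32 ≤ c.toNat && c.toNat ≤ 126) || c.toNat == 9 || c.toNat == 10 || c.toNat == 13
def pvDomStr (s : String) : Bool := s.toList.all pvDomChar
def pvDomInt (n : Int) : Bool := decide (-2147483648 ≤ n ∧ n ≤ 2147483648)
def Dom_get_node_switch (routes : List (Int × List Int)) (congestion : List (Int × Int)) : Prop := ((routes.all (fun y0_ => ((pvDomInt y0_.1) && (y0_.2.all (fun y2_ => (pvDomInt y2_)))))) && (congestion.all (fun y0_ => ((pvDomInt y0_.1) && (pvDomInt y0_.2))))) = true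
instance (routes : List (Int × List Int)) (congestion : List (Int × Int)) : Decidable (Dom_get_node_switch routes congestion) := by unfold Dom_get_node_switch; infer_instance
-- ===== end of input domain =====

-- B replaces A's per-route nested scans (edge list built by index loop, then one scan of it
-- per congestion link) by one pass over the route's consecutive edges against the prebuilt
-- congestion set; objective: alternative decomposition.

-- ===== PORT A =====
-- literal port of A: per route, build the edge list by an index loop, then scan congestion
-- (the pyGetD default 0 is never used on inputs satisfying Pre_: the indices are in range there)
def get_node_switch (routes : List (Int × List Int)) (congestion : List (Int × Int)) : (List (Int × Int)) × List Int :=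
  routes.foldl (fun acc route =>
    let links : List (Int × Int) :=
      (PySem.List.pyRange 0 ((route.2.length : Int) - 1) 1).foldl
        (fun ls i => ls ++ [(PySem.List.pyGetD route.2 i 0, PySem.List.pyGetD route.2 (i + 1) 0)]) []
    let contain : Bool := congestion.all (fun link => links.contains link)
    if contain then
      (acc.1 ++ [(PySem.List.pyGetD route.2 0 0 - 10000, PySem.List.pyGetD route.2 (-1) 0 - 10000)],
       acc.2 ++ [route.1])
    else acc) ([], [])

-- ===== PORT B =====
-- literal port of B: congestion set built once; single pass over zip(path, path[1:]) collecting found links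
def get_node_switch_alt (routes : List (Int × List Int)) (congestion : List (Int × Int)) : (List (Int × Int)) × List Int :=
  let wanted : PySem.Set (Int × Int) := PySem.Set.ofList congestion
  routes.foldl (fun acc r =>
    let found : PySem.Set (Int × Int) :=
      (r.2.zip r.2.tail).foldl
        (fun f e => if wanted.contains e then PySem.Set.add f e else f) []
    if found.length == wanted.length then
      (acc.1 ++ [(PySem.List.pyGetD r.2 0 0 - 10000, PySem.List.pyGetD r.2 (-1) 0 - 10000)],
       acc.2 ++ [r.1])
    else acc) ([], [])

-- ===== PRECONDITION & SPEC =====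
-- Pre_ excludes exactly the inputs where Python A raises IndexError (route[1][0] on an empty
-- path, reached only when congestion is empty); B raises there too.
def Pre_get_node_switch (routes : List (Int × List Int)) (congestion : List (Int × Int)) : Prop :=
  congestion = [] → ∀ r ∈ routes, r.2 ≠ []
instance (routes : List (Int × List Int)) (congestion : List (Int × Int)) : Decidable (Pre_get_node_switch routes congestion) := by unfold Pre_get_node_switch; infer_instance
def pvWitness_get_node_switch : (List (Int × List Int)) × (List (Int × Int)) :=
  ([(1, [10000, 10001]), (2, [10001, 10002, 10000])], [(10001, 10002)])
def Spec_get_node_switch (routes : List (Int × List Int)) (congestion : List (Int × Int)) (out : (List (Int × Int)) × List Int) : Prop := out = get_node_switch_alt routes congestion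
instance (routes : List (Int × List Int)) (congestion : List (Int × Int)) (out : (List (Int × Int)) × List Int) : Decidable (Spec_get_node_switch routes congestion out) := by unfold Spec_get_node_switch; infer_instance

-- ===== CLAIM (what is proved, stated in full; the proofs are below) =====
def Claim_equal_get_node_switch : Prop := ∀ (routes : List (Int × List Int)) (congestion : List (Int × Int)), Dom_get_node_switch routes congestion → Pre_get_node_switch routes congestion → Spec_get_node_switch routes congestion (get_node_switch routes congestion)

-- ===== LEMMAS AND PROOFS =====

-- A's index loop over range(len(path)-1) builds exactly zip(path, path[1:])
theorem links_eq_zip (xs : List Int) :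
    (PySem.List.pyRange 0 ((xs.length : Int) - 1) 1).foldl
        (fun ls i => ls ++ [(PySem.List.pyGetD xs i 0, PySem.List.pyGetD xs (i + 1) 0)]) []
      = xs.zip xs.tail := by
  rw [PySem.List.foldl_append_singleton_eq_map]
  apply List.ext_getElem
  · simp [PySem.List.length_pyRange_one, List.length_zip, List.length_tail]
  · intro k h1 h2
    have hk : (k : Int) < (xs.length : Int) - 1 := by
      simp [PySem.List.length_pyRange_one] at h1; omega
    simp only [List.nil_append, List.getElem_map, PySem.List.getElem_pyRange_one,
      List.getElem_zip]
    have h0 : (0 : Int) + (k : Int) = ((k : Nat) : Int) := by omega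
    have h1' : (k : Int) + 1 = (((k + 1 : Nat)) : Int) := by push_cast; ring
    rw [h0, PySem.List.pyGetD_natCast, h1', PySem.List.pyGetD_natCast]
    have hklt : k < xs.length := by omega
    have hk1 : k + 1 < xs.length := by omega
    simp [List.getD_eq_getElem?_getD, hklt, hk1, List.getElem_tail]

-- B's found-set fold: membership and nodup, with a general accumulator and filter predicate
theorem found_fold_char (p : Int × Int → Bool) (edges : List (Int × Int))
    (s : PySem.Set (Int × Int)) (hs : s.Nodup) :
    (edges.foldl (fun f e => if p e then PySem.Set.add f e else f) s).Nodup ∧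
    ∀ x, x ∈ edges.foldl (fun f e => if p e then PySem.Set.add f e else f) s ↔
      x ∈ s ∨ (x ∈ edges ∧ p x = true) := by
  induction edges generalizing s with
  | nil => simp [hs]
  | cons e t ih =>
    cases hp : p e with
    | true =>
      have hg : (e :: t).foldl (fun f e => if p e then PySem.Set.add f e else f) s
          = t.foldl (fun f e => if p e then PySem.Set.add f e else f) (PySem.Set.add s e) := by
        simp [hp]
      rw [hg]
      have h := ih (PySem.Set.add s e) (PySem.Set.nodup_add s e hs)
      refine ⟨h.1, fun x => ?_⟩
      rw [h.2 x, PySem.Set.mem_add]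
      constructor
      · rintro ((hx | rfl) | ⟨h1, h2⟩)
        · exact Or.inl hx
        · exact Or.inr ⟨List.mem_cons_self .., hp⟩
        · exact Or.inr ⟨List.mem_cons_of_mem _ h1, h2⟩
      · rintro (hx | ⟨h1, h2⟩)
        · exact Or.inl (Or.inl hx)
        · rcases List.mem_cons.1 h1 with rfl | h1
          · exact Or.inl (Or.inr rfl)
          · exact Or.inr ⟨h1, h2⟩
    | false =>
      have hg : (e :: t).foldl (fun f e => if p e then PySem.Set.add f e else f) s
          = t.foldl (fun f e => if p e then PySem.Set.add f e else f) s := by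
        simp [hp]
      rw [hg]
      have h := ih s hs
      refine ⟨h.1, fun x => ?_⟩
      rw [h.2 x]
      constructor
      · rintro (hx | ⟨h1, h2⟩)
        · exact Or.inl hx
        · exact Or.inr ⟨List.mem_cons_of_mem _ h1, h2⟩
      · rintro (hx | ⟨h1, h2⟩)
        · exact Or.inl hx
        · rcases List.mem_cons.1 h1 with rfl | h1
          · rw [hp] at h2; cases h2
          · exact Or.inr ⟨h1, h2⟩

-- the per-route inclusion tests agree: "every congestion link is an edge"
-- equals "the found set has the size of the congestion set"
theorem contain_eq_found (congestion : List (Int × Int)) (edges : List (Int × Int)) :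
    (congestion.all (fun link => edges.contains link)) =
      ((edges.foldl (fun f e =>
          if (PySem.Set.ofList congestion).contains e then PySem.Set.add f e else f)
          []).length == (PySem.Set.ofList congestion).length) := by
  have hchar := found_fold_char (fun e => (PySem.Set.ofList congestion).contains e) edges [] (by simp)
  set wanted := PySem.Set.ofList congestion with hw
  set F := edges.foldl (fun f e => if wanted.contains e then PySem.Set.add f e else f)
      ([] : PySem.Set (Int × Int)) with hF
  have hFmem : ∀ x, x ∈ F ↔ x ∈ edges ∧ x ∈ wanted := by
    intro x
    rw [show (x ∈ F ↔ x ∈ edges ∧ x ∈ wanted) =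
        (x ∈ F ↔ x ∈ edges ∧ wanted.contains x = true) from by
      rw [PySem.Set.contains_iff]]
    simpa using hchar.2 x
  have hFnodup : F.Nodup := hchar.1
  have hWnodup : wanted.Nodup := PySem.Set.nodup_ofList congestion
  have hsub : F ⊆ wanted := fun x hx => ((hFmem x).1 hx).2
  have hsp : F.Subperm wanted := hFnodup.subperm hsub
  rcases hall : congestion.all (fun link => edges.contains link) with _ | _
  · -- some congestion link is not an edge: lengths differ
    symm; rw [beq_eq_false_iff_ne]
    intro hlen
    have hperm := hsp.perm_of_length_le (le_of_eq hlen.symm)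
    simp only [List.all_eq_false] at hall
    rcases hall with ⟨c, hc, hce⟩
    have hcF : c ∈ F := hperm.symm.mem_iff.1 (by rw [hw]; exact (PySem.Set.mem_ofList _ _).2 hc)
    exact absurd (List.elem_eq_true_of_mem ((hFmem c).1 hcF).1) (by simpa using hce)
  · -- all congestion links are edges: wanted ⊆ F, both nodup ⇒ same length
    symm; rw [beq_iff_eq]
    simp only [List.all_eq_true] at hall
    have hsub' : wanted ⊆ F := by
      intro x hx
      have hxcong : x ∈ congestion := by rw [hw] at hx; exact (PySem.Set.mem_ofList _ _).1 hx
      have hxe : x ∈ edges := by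
        have := hall x hxcong; simpa using this
      exact (hFmem x).2 ⟨hxe, hx⟩
    exact le_antisymm hsp.length_le (hWnodup.subperm hsub').length_le

-- ===== VERDICT (by name: the statement is the Claim_ definition above) =====
theorem get_node_switch_spec : Claim_equal_get_node_switch := by
  intro routes congestion _ _
  unfold Spec_get_node_switch get_node_switch get_node_switch_alt
  apply PySem.List.foldl_congr_mem
  intro acc r _
  show (if (congestion.all (fun link =>
        ((PySem.List.pyRange 0 ((r.2.length : Int) - 1) 1).foldl
          (fun ls i => ls ++ [(PySem.List.pyGetD r.2 i 0, PySem.List.pyGetD r.2 (i + 1) 0)]) []).contains link))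
      then (acc.1 ++ [(PySem.List.pyGetD r.2 0 0 - 10000, PySem.List.pyGetD r.2 (-1) 0 - 10000)], acc.2 ++ [r.1])
      else acc)
    = (if ((r.2.zip r.2.tail).foldl
          (fun f e => if (PySem.Set.ofList congestion).contains e then PySem.Set.add f e else f)
          []).length == (PySem.Set.ofList congestion).length
      then (acc.1 ++ [(PySem.List.pyGetD r.2 0 0 - 10000, PySem.List.pyGetD r.2 (-1) 0 - 10000)], acc.2 ++ [r.1])
      else acc)
  rw [links_eq_zip r.2, contain_eq_found congestion (r.2.zip r.2.tail)]
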